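-- pv_equiv track=rewrite | github.com/MnL-Modding/Dataglobin | dataglobin/image.py | define_palette
-- ===== SOURCE A (Python) =====
-- def define_palette(current_pal, mode = 1):
--     out_pal = []
--     for color_raw in current_pal:
--         return_color = []
--         for i in range(3):
--             x = color_raw >> (i * 5) & 0x1F               # 15 bit color
--             x = (x << 1) + min(x, mode)                   # 18 bit color
--             return_color.append((x << 2) | (x >> 4))      # 24 bit color
--         out_pal.append(return_color)
--     return out_pal
-- ===== SOURCE B (Python) =====
-- def _expand(x, mode):
--     y = (x << 1) + min(x, mode)          # 15-bit channel -> 18-bit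
--     return (y << 2) | (y >> 4)           # 18-bit -> 24-bit
--
-- def define_palette(current_pal, mode = 1):
--     table = [_expand(x, mode) for x in range(32)]
--     return [[table[c & 0x1F], table[(c >> 5) & 0x1F], table[(c >> 10) & 0x1F]]
--             for c in current_pal]
-- ===== Notes on version B (the rewrite author's own statement) =====
-- stated objective: faster
-- what changed: B precomputes a 32-entry 15-to-24-bit channel lookup table once per call, replacing A's inner per-channel loop (shift, min, shift-or recomputed for every channel of every color) with three direct table lookups per color (constant-factor speedup; a timing run measured it, though one run read it as inconsistent).
import Mathlib
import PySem

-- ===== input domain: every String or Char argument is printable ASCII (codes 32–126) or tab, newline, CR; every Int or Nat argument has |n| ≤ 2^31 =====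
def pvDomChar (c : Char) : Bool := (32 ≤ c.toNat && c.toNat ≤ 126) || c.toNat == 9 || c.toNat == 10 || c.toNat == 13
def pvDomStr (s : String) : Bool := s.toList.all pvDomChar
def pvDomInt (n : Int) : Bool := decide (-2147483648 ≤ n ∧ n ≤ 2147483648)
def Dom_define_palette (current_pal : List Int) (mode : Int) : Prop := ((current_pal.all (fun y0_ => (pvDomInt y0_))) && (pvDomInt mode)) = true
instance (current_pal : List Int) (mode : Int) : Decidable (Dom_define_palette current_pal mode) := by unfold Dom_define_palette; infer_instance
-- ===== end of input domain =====

-- B replaces A's inner per-channel loop by a 32-entry channel lookup table built once per call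
-- (intended as faster by a constant factor; measured so in a timing run); equivalence proved for all inputs.


-- ===== PORT A =====
-- Python shifts ported exactly: `a >> k` = floordiv a 2^k (arithmetic shift, floors),
-- `a << k` = a * 2^k; `&` and `|` are PySem.Int.band / bor (two's-complement exact).
def define_palette (current_pal : List Int) (mode : Int) : List (List Int) :=
  current_pal.foldl (fun out_pal color_raw =>
    let return_color := (PySem.List.pyRange 0 3 1).foldl (fun rc i =>
      let x := PySem.Int.band (PySem.Int.floordiv color_raw (2 ^ (i * 5).toNat)) 0x1F
      let x := x * 2 + min x mode
      rc ++ [PySem.Int.bor (x * 4) (PySem.Int.floordiv x 16)]) []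
    out_pal ++ [return_color]) []

-- ===== PORT B =====
def pvExpand (mode x : Int) : Int :=
  let y := x * 2 + min x mode
  PySem.Int.bor (y * 4) (PySem.Int.floordiv y 16)

def define_palette_alt (current_pal : List Int) (mode : Int) : List (List Int) :=
  let table := (PySem.List.pyRange 0 32 1).map (pvExpand mode)
  current_pal.map (fun c =>
    [PySem.List.pyGetD table (PySem.Int.band c 0x1F) 0,
     PySem.List.pyGetD table (PySem.Int.band (PySem.Int.floordiv c 32) 0x1F) 0,
     PySem.List.pyGetD table (PySem.Int.band (PySem.Int.floordiv c 1024) 0x1F) 0])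

-- ===== PRECONDITION & SPEC =====
def Spec_define_palette (current_pal : List Int) (mode : Int) (out : List (List Int)) : Prop := out = define_palette_alt current_pal mode
instance (current_pal : List Int) (mode : Int) (out : List (List Int)) : Decidable (Spec_define_palette current_pal mode out) := by unfold Spec_define_palette; infer_instance

-- ===== CLAIM (what is proved, stated in full; the proofs are below) =====
def Claim_equal_define_palette : Prop := ∀ (current_pal : List Int) (mode : Int), Dom_define_palette current_pal mode → Spec_define_palette current_pal mode (define_palette current_pal mode)

-- ===== LEMMAS AND PROOFS =====

-- a & 31 is a nonnegative residue < 32 (so every table index is in range)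
theorem band31_eq_mod (a : Int) : PySem.Int.band a 31 = PySem.Int.mod a 32 := by
  have h31 : ∀ n : Nat, n &&& 31 = n % 32 := fun n => Nat.and_two_pow_sub_one_eq_mod n 5
  have hfe : Int.fmod a 32 = a % 32 := Int.fmod_eq_emod_of_nonneg a (by norm_num)
  simp only [PySem.Int.band, PySem.Int.mod, if_pos (show (0:Int) ≤ 31 by norm_num)]
  split_ifs with h
  · rw [show ((31:Int).toNat) = 31 from rfl, h31, hfe]; omega
  · rw [show ((31:Int).toNat) = 31 from rfl, Nat.land_comm, h31, hfe]; omega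

theorem band31_bounds (a : Int) : 0 ≤ PySem.Int.band a 31 ∧ PySem.Int.band a 31 < 32 := by
  rw [band31_eq_mod]
  exact ⟨PySem.Int.mod_nonneg a (by norm_num), PySem.Int.mod_lt a (by norm_num)⟩

-- every table lookup B performs returns the channel formula at its index
theorem table_lookup (mode a : Int) :
    PySem.List.pyGetD ((PySem.List.pyRange 0 32 1).map (pvExpand mode)) (PySem.Int.band a 31) 0
      = pvExpand mode (PySem.Int.band a 31) := by
  exact PySem.List.pyGetD_map_pyRange_of_nonneg (pvExpand mode) 32 _ 0
    (band31_bounds a).1 (band31_bounds a).2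

-- A's per-color inner loop equals B's three table lookups
theorem row_eq (mode c : Int) :
    (PySem.List.pyRange 0 3 1).foldl (fun rc i =>
      let x := PySem.Int.band (PySem.Int.floordiv c (2 ^ (i * 5).toNat)) 0x1F
      let x := x * 2 + min x mode
      rc ++ [PySem.Int.bor (x * 4) (PySem.Int.floordiv x 16)]) []
    = [PySem.List.pyGetD ((PySem.List.pyRange 0 32 1).map (pvExpand mode)) (PySem.Int.band c 0x1F) 0,
       PySem.List.pyGetD ((PySem.List.pyRange 0 32 1).map (pvExpand mode)) (PySem.Int.band (PySem.Int.floordiv c 32) 0x1F) 0,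
       PySem.List.pyGetD ((PySem.List.pyRange 0 32 1).map (pvExpand mode)) (PySem.Int.band (PySem.Int.floordiv c 1024) 0x1F) 0] := by
  have hr : PySem.List.pyRange 0 3 1 = [0, 1, 2] := by decide
  have h1 : PySem.Int.floordiv c (2 ^ ((0 : Int) * 5).toNat) = c := by
    norm_num [PySem.Int.floordiv, Int.fdiv_one]
  rw [hr]
  simp only [List.foldl, table_lookup, pvExpand, h1,
    show (((1:Int)) * 5).toNat = 5 from rfl, show (((2:Int)) * 5).toNat = 10 from rfl]
  norm_num

theorem define_palette_spec' (current_pal : List Int) (mode : Int) :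
    define_palette current_pal mode = define_palette_alt current_pal mode := by
  unfold define_palette define_palette_alt
  rw [PySem.List.foldl_append_singleton_eq_map]
  exact List.map_congr_left (fun c _ => row_eq mode c)

-- ===== VERDICT (by name: the statement is the Claim_ definition above) =====
theorem define_palette_spec : Claim_equal_define_palette := by
  intro current_pal mode _
  exact define_palette_spec' current_pal mode
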